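-- pv_equiv track=rewrite | github.com/KhanhTungTran/DictionaryOCR | xml_owncode.py | split_by_type_word
-- ===== SOURCE A (Python) =====
-- def split_by_type_word(ls):
--     size, idx, count = len(ls), [], 1
--     for i in range(size):
--         if ls[i][0] == 'I' * count:
--             idx.append(i)
--             count += 1
--     size_i, s = len(idx), []
--     for i in range(size_i - 1):
--         temp = ls[idx[i] + 1 : idx[i + 1]]
--         s.append(temp)
--     s.append(ls[idx[-1] + 1:])
--     return ls[:idx[0]], s
-- ===== SOURCE B (Python) =====
-- def split_by_type_word(ls):
--     # One pass: route each row to the prefix or to the current segment,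
--     # opening a new segment at each sequential 'I'*count marker row.
--     count, prefix, segments, current = 1, [], [], None
--     for x in ls:
--         if x[0] == 'I' * count:
--             if current is not None:
--                 segments.append(current)
--             count += 1
--             current = []
--         elif current is None:
--             prefix.append(x)
--         else:
--             current.append(x)
--     if current is not None:
--         segments.append(current)
--     return prefix, segments
-- ===== Notes on version B (the rewrite author's own statement) =====
-- stated objective: alternative
-- what changed: A scans twice (collect marker indices via range/len, then rebuild the parts with slice arithmetic idx[i]+1:idx[i+1]); B is a single pass over the rows that routes each row to the prefix or the currently open segment, opening a new segment at each sequential 'I'*count marker.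
import Mathlib
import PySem

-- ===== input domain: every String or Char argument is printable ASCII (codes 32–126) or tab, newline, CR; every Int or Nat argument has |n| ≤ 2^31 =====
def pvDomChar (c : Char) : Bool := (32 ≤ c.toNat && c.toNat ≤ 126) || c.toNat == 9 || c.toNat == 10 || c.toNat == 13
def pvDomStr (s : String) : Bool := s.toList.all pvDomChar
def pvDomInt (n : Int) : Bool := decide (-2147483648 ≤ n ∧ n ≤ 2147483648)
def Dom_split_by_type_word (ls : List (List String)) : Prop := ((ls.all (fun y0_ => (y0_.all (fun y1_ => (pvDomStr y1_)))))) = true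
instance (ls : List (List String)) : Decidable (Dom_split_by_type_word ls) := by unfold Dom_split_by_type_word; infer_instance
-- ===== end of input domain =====

-- B replaces A's two-phase (collect marker indices, then slice between them) by ONE pass that
-- routes each row to the prefix or the currently open segment. Equal return values on Pre_.

-- 'I' * count  (Python string repetition; exact on ASCII)
def repI (count : Nat) : String := String.ofList (List.replicate count 'I')

-- ===== PORT A =====
-- loop body of A's first loop: if ls[i][0] == 'I'*count: idx.append(i); count += 1
-- (ls[i][0] raises on an empty row; Pre_ excludes that, the port reads a default "")
def aStep1 (ls : List (List String)) (st : List Int × Nat) (i : Int) : List Int × Nat :=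
  if ((PySem.List.pyGet? ls i).getD []).headD "" = repI st.2
  then (st.1 ++ [i], st.2 + 1) else st

-- loop body of A's second loop: s.append(ls[idx[i]+1 : idx[i+1]])
def aStep2 (ls : List (List String)) (idx : List Int) (s : List (List (List String))) (i : Int) :
    List (List (List String)) :=
  s ++ [PySem.List.slice ls (some ((PySem.List.pyGet? idx i).getD 0 + 1))
                            (some ((PySem.List.pyGet? idx (i + 1)).getD 0))]

def split_by_type_word (ls : List (List String)) : List (List String) × List (List (List String)) :=
  let size : Int := ls.length
  let st := (PySem.List.pyRange 0 size 1).foldl (aStep1 ls) ([], 1)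
  let idx := st.1
  let size_i : Int := idx.length
  let s := (PySem.List.pyRange 0 (size_i - 1) 1).foldl (aStep2 ls idx) []
  -- s.append(ls[idx[-1]+1:])  (idx[-1] raises when idx == []; Pre_ excludes that)
  let s := s ++ [PySem.List.slice ls (some ((PySem.List.pyGet? idx (-1)).getD 0 + 1)) none]
  (PySem.List.slice ls none (some ((PySem.List.pyGet? idx 0).getD 0)), s)

-- ===== PORT B =====
-- loop body of B: route row x to the prefix or the open segment, open a new segment on a marker
def bStep (st : Nat × List (List String) × List (List (List String)) × Option (List (List String)))
    (x : List String) :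
    Nat × List (List String) × List (List (List String)) × Option (List (List String)) :=
  let (count, pre, segs, cur) := st
  if x.headD "" = repI count then
    (count + 1, pre, (match cur with | some c => segs ++ [c] | none => segs), some [])
  else
    match cur with
    | none => (count, pre ++ [x], segs, none)
    | some c => (count, pre, segs, some (c ++ [x]))

-- after the loop: append the still-open segment, return (prefix, segments)
def bFinish (st : Nat × List (List String) × List (List (List String)) × Option (List (List String))) :
    List (List String) × List (List (List String)) :=
  (st.2.1, match st.2.2.2 with | some c => st.2.2.1 ++ [c] | none => st.2.2.1)

def split_by_type_word_alt (ls : List (List String)) : List (List String) × List (List (List String)) :=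
  bFinish (ls.foldl bStep (1, [], [], none))

-- ===== PRECONDITION & SPEC =====
-- Pre_ excludes exactly the inputs where the Python A raises IndexError: an empty row
-- (ls[i][0]; B raises there too) or no row whose first cell is 'I' (idx[0]/idx[-1] on the
-- empty idx; B returns (ls, []) there).
def Pre_split_by_type_word (ls : List (List String)) : Prop :=
  (∀ r ∈ ls, r ≠ []) ∧ ∃ r ∈ ls, r.headD "" = "I"
instance (ls : List (List String)) : Decidable (Pre_split_by_type_word ls) := by
  unfold Pre_split_by_type_word; infer_instance

def pvWitness_split_by_type_word : List (List String) := [["I"], ["a"]]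

def Spec_split_by_type_word (ls : List (List String)) (out : List (List String) × List (List (List String))) : Prop := out = split_by_type_word_alt ls
instance (ls : List (List String)) (out : List (List String) × List (List (List String))) : Decidable (Spec_split_by_type_word ls out) := by unfold Spec_split_by_type_word; infer_instance

-- ===== CLAIM (what is proved, stated in full; the proofs are below) =====
def Claim_equal_split_by_type_word : Prop := ∀ (ls : List (List String)), Dom_split_by_type_word ls → Pre_split_by_type_word ls → Spec_split_by_type_word ls (split_by_type_word ls)

-- ===== LEMMAS AND PROOFS =====

-- Marker positions (relative, Nat) together with the final count, as A's first loop finds them.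
def idxN (c : Nat) : List (List String) → List Nat × Nat
  | [] => ([], c)
  | x :: xs =>
    if x.headD "" = repI c then
      let r := idxN (c + 1) xs
      (0 :: r.1.map (· + 1), r.2)
    else
      let r := idxN c xs
      (r.1.map (· + 1), r.2)

-- A's second loop, recursively over adjacent index pairs.
def segsIdx (ls : List (List String)) : List Nat → List (List (List String))
  | [] => []
  | [j] => [ls.drop (j + 1)]
  | j :: j' :: rest => (ls.drop (j + 1)).take (j' - (j + 1)) :: segsIdx ls (j' :: rest)

-- B inside an open segment `cur`.
def segsAux (c : Nat) (cur : List (List String)) : List (List String) → List (List (List String))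
  | [] => [cur]
  | x :: xs => if x.headD "" = repI c then cur :: segsAux (c + 1) [] xs else segsAux c (cur ++ [x]) xs

-- B before the first marker.
def bPhase (c : Nat) (p : List (List String)) : List (List String) → List (List String) × List (List (List String))
  | [] => (p, [])
  | x :: xs => if x.headD "" = repI c then (p, segsAux (c + 1) [] xs) else bPhase c (p ++ [x]) xs


-- step reductions for B's loop body
theorem bStep_marker (count : Nat) (p : List (List String)) (segs : List (List (List String)))
    (cur : Option (List (List String))) (x : List String) (hx : x.headD "" = repI count) :
    bStep (count, p, segs, cur) x
      = (count + 1, p, (match cur with | some c => segs ++ [c] | none => segs), some []) := by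
  have hx' : x.head?.getD "" = repI count := by simpa using hx
  simp [bStep, hx']

theorem bStep_none (count : Nat) (p : List (List String)) (segs : List (List (List String)))
    (x : List String) (hx : ¬ x.headD "" = repI count) :
    bStep (count, p, segs, none) x = (count, p ++ [x], segs, none) := by
  have hx' : ¬ x.head?.getD "" = repI count := by simpa using hx
  simp [bStep, hx']

theorem bStep_some (count : Nat) (p : List (List String)) (segs : List (List (List String)))
    (c : List (List String)) (x : List String) (hx : ¬ x.headD "" = repI count) :
    bStep (count, p, segs, some c) x = (count, p, segs, some (c ++ [x])) := by
  have hx' : ¬ x.head?.getD "" = repI count := by simpa using hx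
  simp [bStep, hx']

-- B's fold with an open segment finishes as segsAux.
theorem bfold_some (xs : List (List String)) : ∀ (count : Nat) (p : List (List String))
    (segs : List (List (List String))) (cur : List (List String)),
    bFinish (xs.foldl bStep (count, p, segs, some cur)) = (p, segs ++ segsAux count cur xs) := by
  induction xs with
  | nil => intro count p segs cur; simp [bFinish, segsAux]
  | cons x xs ih =>
    intro count p segs cur
    rw [List.foldl_cons]
    by_cases hx : x.headD "" = repI count
    · rw [bStep_marker count p segs (some cur) x hx, ih, segsAux, if_pos hx]
      simp
    · rw [bStep_some count p segs cur x hx, ih, segsAux, if_neg hx]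

-- B's fold before the first marker finishes as bPhase.
theorem bfold_none (xs : List (List String)) : ∀ (count : Nat) (p : List (List String))
    (segs : List (List (List String))),
    bFinish (xs.foldl bStep (count, p, segs, none)) = ((bPhase count p xs).1, segs ++ (bPhase count p xs).2) := by
  induction xs with
  | nil => intro count p segs; simp [bFinish, bPhase]
  | cons x xs ih =>
    intro count p segs
    rw [List.foldl_cons]
    by_cases hx : x.headD "" = repI count
    · rw [bStep_marker count p segs none x hx, bfold_some, bPhase, if_pos hx]
    · rw [bStep_none count p segs x hx, ih, bPhase, if_neg hx]

theorem alt_eq_bPhase (ls : List (List String)) : split_by_type_word_alt ls = bPhase 1 [] ls := by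
  rw [split_by_type_word_alt, bfold_none]
  simp

-- A's second loop (adjacent-pair slices plus final tail) equals segsIdx.
theorem range2segs (J' : List Nat) : ∀ (j : Nat) (ls : List (List String)),
    (List.range J'.length).map (fun t =>
        (ls.drop ((j :: J').getD t 0 + 1)).take (J'.getD t 0 - ((j :: J').getD t 0 + 1)))
      ++ [ls.drop (((j :: J').getLast?).getD 0 + 1)]
    = segsIdx ls (j :: J') := by
  induction J' with
  | nil => intro j ls; simp [segsIdx]
  | cons j2 J'' ih =>
    intro j ls
    simp only [List.length_cons]
    rw [List.range_succ_eq_map]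
    simp only [List.map_cons, List.map_map, List.getD_cons_zero, List.getLast?_cons_cons]
    rw [segsIdx]
    refine congrArg₂ (· :: ·) rfl ?_
    have := ih j2 ls
    rw [← this]
    rfl

theorem idxN_cons_pos (c : Nat) (x : List String) (xs : List (List String))
    (hx : x.headD "" = repI c) :
    idxN c (x :: xs) = (0 :: (idxN (c + 1) xs).1.map (· + 1), (idxN (c + 1) xs).2) := by
  rw [idxN, if_pos hx]

theorem idxN_cons_neg (c : Nat) (x : List String) (xs : List (List String))
    (hx : ¬ x.headD "" = repI c) :
    idxN c (x :: xs) = ((idxN c xs).1.map (· + 1), (idxN c xs).2) := by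
  rw [idxN, if_neg hx]

-- slices between the markers found after an open marker at j equal B's segsAux.
theorem segsIdx_eq_segsAux (tl : List (List String)) : ∀ (c : Nat) (cur : List (List String))
    (ls : List (List String)) (j : Nat), ls.drop (j + 1) = cur ++ tl →
    segsIdx ls (j :: (idxN c tl).1.map (· + (j + 1 + cur.length))) = segsAux c cur tl := by
  induction tl with
  | nil =>
    intro c cur ls j hdrop
    rw [idxN]
    simp only [List.map_nil]
    rw [segsIdx, segsAux]
    simp at hdrop
    rw [hdrop]
  | cons x xs ih =>
    intro c cur ls j hdrop
    by_cases hx : x.headD "" = repI c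
    · rw [idxN_cons_pos c x xs hx]
      simp only [List.map_cons, List.map_map, Function.comp_def]
      rw [segsIdx, segsAux, if_pos hx]
      have htake : (ls.drop (j + 1)).take (0 + (j + 1 + cur.length) - (j + 1)) = cur := by
        have h1 : 0 + (j + 1 + cur.length) - (j + 1) = cur.length := by omega
        rw [h1, hdrop]
        simpa using List.take_left cur (x :: xs)
      rw [htake]
      have hdrop2 : ls.drop (0 + (j + 1 + cur.length) + 1) = ([] : List (List String)) ++ xs := by
        have h1 : 0 + (j + 1 + cur.length) + 1 = (j + 1) + (cur.length + 1) := by omega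
        rw [h1, ← List.drop_drop, hdrop]
        have h2 : cur ++ x :: xs = (cur ++ [x]) ++ xs := by simp
        have h3 : cur.length + 1 = (cur ++ [x]).length := by simp
        rw [h2, h3]
        simpa using List.drop_left (cur ++ [x]) xs
      have hfun : ((idxN (c + 1) xs).1.map fun n => n + 1 + (j + 1 + cur.length))
          = (idxN (c + 1) xs).1.map (· + (0 + (j + 1 + cur.length) + 1 + ([] : List (List String)).length)) := by
        apply List.map_congr_left
        intro n _
        simp; omega
      rw [hfun, ih (c + 1) [] ls (0 + (j + 1 + cur.length)) hdrop2]
    · rw [idxN_cons_neg c x xs hx]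
      simp only [List.map_map, Function.comp_def]
      rw [segsAux, if_neg hx]
      have hdrop2 : ls.drop (j + 1) = (cur ++ [x]) ++ xs := by rw [hdrop]; simp
      have hfun : ((idxN c xs).1.map fun n => n + 1 + (j + 1 + cur.length))
          = (idxN c xs).1.map (· + (j + 1 + (cur ++ [x]).length)) := by
        apply List.map_congr_left
        intro n _
        simp; omega
      rw [hfun, ih c (cur ++ [x]) ls j hdrop2]

theorem top_eq (rest : List (List String)) : ∀ (done : List (List String)), (idxN 1 rest).1 ≠ [] →
    ((done ++ rest).take (((idxN 1 rest).1.map (· + done.length)).headD 0),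
     segsIdx (done ++ rest) ((idxN 1 rest).1.map (· + done.length)))
    = bPhase 1 done rest := by
  induction rest with
  | nil => intro done h; rw [idxN] at h; simp at h
  | cons x xs ih =>
    intro done h
    by_cases hx : x.headD "" = repI 1
    · rw [idxN_cons_pos 1 x xs hx]
      simp only [List.map_cons, List.map_map, Function.comp_def, List.headD_cons]
      rw [bPhase, if_pos hx]
      have htake : (done ++ x :: xs).take (0 + done.length) = done := by
        have h1 : 0 + done.length = done.length := by omega
        rw [h1]
        simpa using List.take_left done (x :: xs)
      rw [htake]
      have hdrop : (done ++ x :: xs).drop (0 + done.length + 1) = ([] : List (List String)) ++ xs := by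
        have h2 : done ++ x :: xs = (done ++ [x]) ++ xs := by simp
        have h3 : 0 + done.length + 1 = (done ++ [x]).length := by simp
        rw [h2, h3]
        simpa using List.drop_left (done ++ [x]) xs
      have hfun : ((idxN 2 xs).1.map fun n => n + 1 + done.length)
          = (idxN 2 xs).1.map (· + (0 + done.length + 1 + ([] : List (List String)).length)) := by
        apply List.map_congr_left
        intro n _
        simp; omega
      rw [hfun, segsIdx_eq_segsAux xs 2 [] (done ++ x :: xs) (0 + done.length) hdrop]
    · rw [idxN_cons_neg 1 x xs hx]
      simp only [List.map_map, Function.comp_def]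
      rw [bPhase, if_neg hx]
      have hne : (idxN 1 xs).1 ≠ [] := by
        rw [idxN_cons_neg 1 x xs hx] at h
        simpa using h
      have hfun : ((idxN 1 xs).1.map fun n => n + 1 + done.length)
          = (idxN 1 xs).1.map (· + (done ++ [x]).length) := by
        apply List.map_congr_left
        intro n _
        simp; omega
      have hassoc : done ++ x :: xs = (done ++ [x]) ++ xs := by simp
      rw [hassoc, hfun, ih (done ++ [x]) hne]

theorem idxN_ne_nil (ls : List (List String)) : ∀ (c : Nat), (∃ r ∈ ls, r.headD "" = repI c) →
    (idxN c ls).1 ≠ [] := by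
  induction ls with
  | nil => intro c h; simp at h
  | cons x xs ih =>
    intro c h
    by_cases hx : x.headD "" = repI c
    · rw [idxN, if_pos hx]; simp
    · have hxs : ∃ r ∈ xs, r.headD "" = repI c := by
        obtain ⟨r, hr, he⟩ := h
        rcases List.mem_cons.mp hr with rfl | hr'
        · exact absurd he hx
        · exact ⟨r, hr', he⟩
      rw [idxN, if_neg hx]
      simpa using ih c hxs

-- A's first loop over range(len(ls)) equals the structural marker scan idxN (shifted by the scanned prefix).
theorem phase1_eq (rest : List (List String)) : ∀ (pre : List (List String)) (acc : List Int) (c : Nat),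
    (PySem.List.pyRange (pre.length : Int) ((pre.length + rest.length : Nat) : Int) 1).foldl
      (aStep1 (pre ++ rest)) (acc, c)
    = (acc ++ (idxN c rest).1.map (fun n => ((pre.length + n : Nat) : Int)), (idxN c rest).2) := by
  induction rest with
  | nil =>
    intro pre acc c
    rw [idxN]
    simp
  | cons x xs ih =>
    intro pre acc c
    have hlt : (pre.length : Int) < ((pre.length + (x :: xs).length : Nat) : Int) := by
      simp only [List.length_cons]; push_cast; omega
    rw [PySem.List.pyRange_one_cons hlt, List.foldl_cons]
    have hget : PySem.List.pyGet? (pre ++ x :: xs) (pre.length : Int) = some x :=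
      PySem.List.pyGet?_append_length pre xs x
    have e1 : pre ++ x :: xs = (pre ++ [x]) ++ xs := by simp
    have e2 : (pre.length : Int) + 1 = ((pre ++ [x]).length : Int) := by simp
    have e3 : ((pre.length + (x :: xs).length : Nat) : Int) = (((pre ++ [x]).length + xs.length : Nat) : Int) := by
      simp only [List.length_cons, List.length_append, List.length_nil]; push_cast; omega
    by_cases hx : x.headD "" = repI c
    · have hstep : aStep1 (pre ++ x :: xs) (acc, c) (pre.length : Int) = (acc ++ [(pre.length : Int)], c + 1) := by
        have hx' : x.head?.getD "" = repI c := by simpa using hx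
        simp [aStep1, hx']
      rw [hstep, e3, e2, e1, ih (pre ++ [x]) (acc ++ [(pre.length : Int)]) (c + 1)]
      rw [idxN_cons_pos c x xs hx]
      simp only [List.map_cons, List.map_map, Function.comp_def, List.length_append,
        List.length_cons, List.length_nil]
      refine Prod.ext ?_ rfl
      show (acc ++ [(pre.length : Int)]) ++ (idxN (c + 1) xs).1.map (fun n => ((pre.length + 1 + n : Nat) : Int))
          = acc ++ ((pre.length + 0 : Nat) : Int) :: (idxN (c + 1) xs).1.map (fun n => ((pre.length + (n + 1) : Nat) : Int))
      have hf : ((idxN (c + 1) xs).1.map fun n => ((pre.length + 1 + n : Nat) : Int))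
          = (idxN (c + 1) xs).1.map (fun n => ((pre.length + (n + 1) : Nat) : Int)) := by
        apply List.map_congr_left
        intro n _
        congr 1
        omega
      rw [hf]
      simp
    · have hstep : aStep1 (pre ++ x :: xs) (acc, c) (pre.length : Int) = (acc, c) := by
        have hx' : ¬ x.head?.getD "" = repI c := by simpa using hx
        simp [aStep1, hx']
      rw [hstep, e3, e2, e1, ih (pre ++ [x]) acc c]
      rw [idxN_cons_neg c x xs hx]
      simp only [List.map_map, Function.comp_def, List.length_append, List.length_cons, List.length_nil]
      refine Prod.ext ?_ rfl
      show acc ++ (idxN c xs).1.map (fun n => ((pre.length + 1 + n : Nat) : Int))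
          = acc ++ (idxN c xs).1.map (fun n => ((pre.length + (n + 1) : Nat) : Int))
      congr 1
      apply List.map_congr_left
      intro n _
      congr 1
      omega

-- A's port, assembled: prefix up to the first marker, segsIdx on the marker positions.
theorem a_assembled (ls : List (List String)) (h : (idxN 1 ls).1 ≠ []) :
    split_by_type_word ls = (ls.take ((idxN 1 ls).1.headD 0), segsIdx ls (idxN 1 ls).1) := by
  obtain ⟨j, J', hJ⟩ : ∃ j J', (idxN 1 ls).1 = j :: J' := by
    cases hc : (idxN 1 ls).1 with
    | nil => exact absurd hc h
    | cons a l => exact ⟨a, l, rfl⟩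
  have h1 := phase1_eq ls [] [] 1
  simp only [List.length_nil, List.nil_append, Nat.cast_zero, zero_add] at h1
  simp only [split_by_type_word]
  rw [h1, hJ]
  -- prefix: ls[:idx[0]] = ls.take j
  have hpre : PySem.List.slice ls none (some ((PySem.List.pyGet? ((j :: J').map (fun n : Nat => (n : Int))) 0).getD 0)) = ls.take j := by
    rw [List.map_cons, PySem.List.pyGet?_zero_cons]
    simpa using PySem.List.slice_to_natCast ls j
  -- last: ls[idx[-1]+1:]
  obtain ⟨L, hL⟩ : ∃ L, (j :: J').getLast? = some L := by
    cases hgl : (j :: J').getLast? with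
    | none => simp at hgl
    | some a => exact ⟨a, rfl⟩
  have hlast : PySem.List.slice ls (some ((PySem.List.pyGet? ((j :: J').map (fun n : Nat => (n : Int))) (-1)).getD 0 + 1)) none = ls.drop (L + 1) := by
    rw [PySem.List.pyGet?_neg_one, List.getLast?_map, hL]
    simp only [Option.map_some, Option.getD_some]
    have hc : ((L : Int) + 1) = ((L + 1 : Nat) : Int) := by push_cast; ring
    rw [hc]
    exact PySem.List.slice_from_natCast ls (L + 1)
  -- middle loop: range(size_i - 1) of adjacent-pair slices
  have hlen : ((((j :: J').map (fun n : Nat => (n : Int))).length : Int)) - 1 = (J'.length : Int) := by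
    simp
  have hrange : PySem.List.pyRange 0 (J'.length : Int) 1 = (List.range J'.length).map (fun k => ((k : Nat) : Int)) := by
    rw [PySem.List.pyRange_one]
    simp
  have hmid : ((List.range J'.length).map (fun k => ((k : Nat) : Int))).foldl (aStep2 ls ((j :: J').map (fun n : Nat => (n : Int)))) []
      = (List.range J'.length).map (fun t =>
          (ls.drop ((j :: J').getD t 0 + 1)).take (J'.getD t 0 - ((j :: J').getD t 0 + 1))) := by
    unfold aStep2
    rw [PySem.List.foldl_append_singleton_eq_map]
    rw [List.map_map]
    simp only [List.nil_append]
    apply List.map_congr_left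
    intro k hk
    simp only [List.mem_range] at hk
    simp only [Function.comp_def]
    have hk1 : k < (j :: J').length := by simp; omega
    have hk2 : k + 1 < (j :: J').length := by simp; omega
    have hg1 : (PySem.List.pyGet? ((j :: J').map (fun n : Nat => (n : Int))) (k : Int)).getD 0 = (((j :: J').getD k 0 : Nat) : Int) := by
      rw [PySem.List.pyGet?_natCast, List.getElem?_map, List.getElem?_eq_getElem hk1]
      simp [List.getD_eq_getElem?_getD, List.getElem?_eq_getElem hk1]
    have hg2 : (PySem.List.pyGet? ((j :: J').map (fun n : Nat => (n : Int))) ((k : Int) + 1)).getD 0 = ((J'.getD k 0 : Nat) : Int) := by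
      have hcast : ((k : Int) + 1) = ((k + 1 : Nat) : Int) := by push_cast; ring
      rw [hcast, PySem.List.pyGet?_natCast, List.getElem?_map, List.getElem?_eq_getElem hk2]
      have hidx : (j :: J')[k + 1] = J'[k] := by simp
      rw [hidx]
      simp [List.getD_eq_getElem?_getD, List.getElem?_eq_getElem hk]
    rw [hg1, hg2]
    have hcast : ((((j :: J').getD k 0 : Nat) : Int) + 1) = (((j :: J').getD k 0 + 1 : Nat) : Int) := by push_cast; ring
    rw [hcast]
    exact PySem.List.slice_natCast ls ((j :: J').getD k 0 + 1) (J'.getD k 0)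
  rw [hlen, hrange, hmid, hpre, hlast]
  have hseg := range2segs J' j ls
  rw [hL] at hseg
  simp only [Option.getD_some] at hseg
  rw [hseg]
  simp

-- ===== VERDICT (by name: the statement is the Claim_ definition above) =====
theorem split_by_type_word_spec : Claim_equal_split_by_type_word := by
  intro ls _ hPre
  have hm : (idxN 1 ls).1 ≠ [] := by
    apply idxN_ne_nil ls 1
    obtain ⟨r, hr, he⟩ := hPre.2
    exact ⟨r, hr, by simpa [repI] using he⟩
  show split_by_type_word ls = split_by_type_word_alt ls
  rw [a_assembled ls hm, alt_eq_bPhase ls]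
  have := top_eq ls [] hm
  simpa using this
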